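-- pv_equiv track=rewrite | github.com/AlexanderGaliano18/InChiral | app.py | analizar_centros_existentes
-- ===== SOURCE A (Python) =====
-- def analizar_centros_existentes(smiles: str):
--     """
--     Analiza si el SMILES ya tiene centros quirales especificados con @ o @@
--     """
--     centros_especificados = 0
--     i = 0
--     posiciones_at = []
--
--     while i < len(smiles):
--         if smiles[i] == "@":
--             if i + 1 < len(smiles) and smiles[i+1] == "@":
--                 centros_especificados += 1
--                 posiciones_at.append(i)
--                 i += 2
--             else:
--                 centros_especificados += 1
--                 posiciones_at.append(i)
--                 i += 1
--         else:
--             i += 1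
--
--     return centros_especificados, posiciones_at
-- ===== SOURCE B (Python) =====
-- def analizar_centros_existentes(smiles: str):
--     # Single for-loop with a run-length parity state instead of while-loop index jumps:
--     # within a run of consecutive '@'s, marker starts are exactly the even offsets.
--     posiciones = []
--     run = 0
--     for i, ch in enumerate(smiles):
--         if ch == "@":
--             if run % 2 == 0:
--                 posiciones.append(i)
--             run += 1
--         else:
--             run = 0
--     return len(posiciones), posiciones
-- ===== Notes on version B (the rewrite author's own statement) =====
-- stated objective: alternative
-- what changed: Replaces the while loop with manual index jumps (i+=2 on '@@') and repeated smiles[i]/smiles[i+1] indexing by a single for-loop over enumerate(smiles) maintaining a run-length parity state: a marker starts exactly at even offsets within each run of consecutive '@'s, and the count is len(positions).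
import Mathlib
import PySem

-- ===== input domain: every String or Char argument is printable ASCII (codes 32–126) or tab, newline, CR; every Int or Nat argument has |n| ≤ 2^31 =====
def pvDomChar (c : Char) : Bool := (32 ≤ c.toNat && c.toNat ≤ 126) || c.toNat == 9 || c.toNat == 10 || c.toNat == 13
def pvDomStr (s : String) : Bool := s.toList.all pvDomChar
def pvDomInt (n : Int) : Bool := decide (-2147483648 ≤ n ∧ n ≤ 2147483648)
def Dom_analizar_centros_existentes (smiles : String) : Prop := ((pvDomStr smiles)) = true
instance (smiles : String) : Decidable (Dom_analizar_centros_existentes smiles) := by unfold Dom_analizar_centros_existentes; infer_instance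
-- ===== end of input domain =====

-- B replaces A's while loop with manual index jumps (i += 2 on "@@") by a single
-- for-loop over enumerate(smiles) with a run-length parity state (objective: alternative).

-- ===== PORT A =====
-- A's while loop: recursion over the remaining characters, keeping the Python index i,
-- the counter and the accumulated position list; the '@@' branch consumes two chars (i += 2).
def pvLoopA : List Char → Int → Int → List Int → Int × List Int
  | [], _, c, ps => (c, ps)
  | [x], i, c, ps =>
    if x = '@' then pvLoopA [] (i + 1) (c + 1) (ps ++ [i])
    else pvLoopA [] (i + 1) c ps
  | x :: y :: rest2, i, c, ps =>
    if x = '@' then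
      if y = '@' then pvLoopA rest2 (i + 2) (c + 1) (ps ++ [i])
      else pvLoopA (y :: rest2) (i + 1) (c + 1) (ps ++ [i])
    else pvLoopA (y :: rest2) (i + 1) c ps

def analizar_centros_existentes (smiles : String) : Int × List Int :=
  pvLoopA smiles.toList 0 0 []

-- ===== PORT B =====
-- Source B's loop body: state (run, posiciones); append i when the current '@'-run length is even.
def pvStepB (st : Int × List Int) (p : Int × Char) : Int × List Int :=
  if p.2 = '@' then (st.1 + 1, if st.1 % 2 = 0 then st.2 ++ [p.1] else st.2)
  else (0, st.2)

def analizar_centros_existentes_alt (smiles : String) : Int × List Int :=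
  let st := (PySem.List.enumerate smiles.toList).foldl pvStepB (0, [])
  ((st.2.length : Int), st.2)

-- ===== PRECONDITION & SPEC =====
def Spec_analizar_centros_existentes (smiles : String) (out : Int × List Int) : Prop := out = analizar_centros_existentes_alt smiles
instance (smiles : String) (out : Int × List Int) : Decidable (Spec_analizar_centros_existentes smiles out) := by unfold Spec_analizar_centros_existentes; infer_instance

-- ===== CLAIM (what is proved, stated in full; the proofs are below) =====
def Claim_equal_analizar_centros_existentes : Prop := ∀ (smiles : String), Dom_analizar_centros_existentes smiles → Spec_analizar_centros_existentes smiles (analizar_centros_existentes smiles)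

-- ===== LEMMAS AND PROOFS =====

theorem pvFoldB_cons (l : List Char) (x : Char) (i : Int) (st : Int × List Int) :
    (PySem.List.enumerate (x :: l) i).foldl pvStepB st
      = (PySem.List.enumerate l (i + 1)).foldl pvStepB (pvStepB st (i, x)) := by
  simp [PySem.List.enumerate_cons]

-- Main invariant: at every top of A's loop, B's run state is even, or the next char is not '@';
-- A's counter equals the length of the accumulated positions list.
theorem pvMain : ∀ (n : Nat) (l : List Char) (i run : Int) (ps : List Int),
    l.length ≤ n → (run % 2 = 0 ∨ l.head? ≠ some '@') →
    pvLoopA l i ((ps.length : Int)) ps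
      = (let st := (PySem.List.enumerate l i).foldl pvStepB (run, ps)
         ((st.2.length : Int), st.2)) := by
  intro n
  induction n with
  | zero =>
    intro l i run ps hn _
    have : l = [] := List.eq_nil_of_length_eq_zero (Nat.le_zero.mp hn)
    subst this
    simp [pvLoopA, PySem.List.enumerate_nil]
  | succ n ih =>
    intro l i run ps hn hinv
    match l with
    | [] => simp [pvLoopA, PySem.List.enumerate_nil]
    | [x] =>
      by_cases hx : x = '@'
      · subst hx
        have hrun : run % 2 = 0 := by
          rcases hinv with h | h
          · exact h
          · simp at h
        rw [pvFoldB_cons]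
        simp [pvLoopA, pvStepB, hrun, PySem.List.enumerate_nil]
      · rw [pvFoldB_cons]
        simp [pvLoopA, pvStepB, hx, PySem.List.enumerate_nil]
    | x :: y :: rest2 =>
      by_cases hx : x = '@'
      · subst hx
        have hrun : run % 2 = 0 := by
          rcases hinv with h | h
          · exact h
          · simp at h
        by_cases hy : y = '@'
        · subst hy
          rw [pvFoldB_cons, pvFoldB_cons]
          have hrun2 : ¬ ((run + 1) % 2 = 0) := by omega
          simp only [pvLoopA, pvStepB, ite_true, if_pos hrun, if_neg hrun2]
          have := ih rest2 (i + 1 + 1) (run + 1 + 1) (ps ++ [i])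
            (by simp at hn ⊢; omega) (Or.inl (by omega))
          rw [show ((ps.length : Int) + 1) = (((ps ++ [i]).length : Int)) by simp,
             show (i + 2 : Int) = i + 1 + 1 by ring]
          exact this
        · rw [pvFoldB_cons]
          simp only [pvLoopA, pvStepB, ite_true, if_neg hy, if_pos hrun]
          rw [show ((ps.length : Int) + 1) = (((ps ++ [i]).length : Int)) by simp]
          exact ih (y :: rest2) (i + 1) (run + 1) (ps ++ [i])
            (by simp at hn ⊢; omega) (Or.inr (by simp [hy]))
      · rw [pvFoldB_cons]
        simp only [pvLoopA, pvStepB, if_neg hx]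
        exact ih (y :: rest2) (i + 1) 0 ps (by simp at hn ⊢; omega) (Or.inl (by decide))

-- ===== VERDICT (by name: the statement is the Claim_ definition above) =====
theorem analizar_centros_existentes_spec : Claim_equal_analizar_centros_existentes := by
  intro smiles _
  unfold Spec_analizar_centros_existentes analizar_centros_existentes analizar_centros_existentes_alt
  have := pvMain smiles.toList.length smiles.toList 0 0 [] le_rfl (Or.inl (by decide))
  simpa using this
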